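-- pv_equiv track=rewrite | github.com/jkmazzetti/TestLaboralesPython | lista_max_min.py | ordenar_maximo_minimo
-- ===== SOURCE A (Python) =====
-- def ordenar_maximo_minimo(una_lista):
--     max=None
--     min=None
--     for i in range(len(una_lista)):
--         if i==0:
--             max=una_lista[i]
--             min=una_lista[i]
--         else:
--             if max<una_lista[i]:
--                 max=una_lista[i]
--             if min>una_lista[i]:
--                 min=una_lista[i]
--     una_lista.sort()
--     una_lista.reverse()
--     return una_lista, max, min
-- ===== SOURCE B (Python) =====
-- def ordenar_maximo_minimo(una_lista):
--     una_lista.sort(reverse=True)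
--     if not una_lista:
--         return una_lista, None, None
--     return una_lista, una_lista[0], una_lista[-1]
-- ===== Notes on version B (the rewrite author's own statement) =====
-- stated objective: simpler
-- what changed: B drops A's index-based running max/min scan entirely: it sorts descending once and reads the extremes off the sorted list's ends (max = first element, min = last), removing the interpreted Python loop.
-- outside the precondition, e.g. on ordenar_maximo_minimo([]): A returns ([], None, None), B returns ([], None, None)
import Mathlib
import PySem

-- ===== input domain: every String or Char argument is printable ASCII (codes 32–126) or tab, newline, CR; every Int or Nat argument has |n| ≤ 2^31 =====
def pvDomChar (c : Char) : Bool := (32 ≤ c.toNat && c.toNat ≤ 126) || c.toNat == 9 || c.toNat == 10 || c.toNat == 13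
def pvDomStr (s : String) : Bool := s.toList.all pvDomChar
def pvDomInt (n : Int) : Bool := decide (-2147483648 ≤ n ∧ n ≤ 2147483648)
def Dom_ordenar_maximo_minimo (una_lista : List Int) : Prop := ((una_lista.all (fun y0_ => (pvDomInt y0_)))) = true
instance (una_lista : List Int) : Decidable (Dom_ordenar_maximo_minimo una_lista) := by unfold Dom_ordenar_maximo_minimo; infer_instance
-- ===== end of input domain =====

-- B replaces A's running max/min index loop by reading the extremes off the descending-sorted
-- list (objective: simpler). Both A and B sort the argument list in place in Python; the
-- equivalence proved here is about the RETURN value.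

-- ===== PORT A =====
-- A's loop state: (max, min), each Option Int (None before the first iteration).
def pvStepA (xs : List Int) (mm : Option Int × Option Int) (i : Int) : Option Int × Option Int :=
  let x := PySem.List.pyGetD xs i 0
  if i = 0 then (some x, some x)
  else
    let mx := if mm.1.getD 0 < x then some x else mm.1
    let mn := if x < mm.2.getD 0 then some x else mm.2
    (mx, mn)

def ordenar_maximo_minimo (una_lista : List Int) : List Int × Int × Int :=
  let mm := (PySem.List.pyRange 0 una_lista.length 1).foldl (pvStepA una_lista) (none, none)
  let s := (PySem.List.sorted una_lista (fun x => x) false).reverse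
  -- Python returns (s, None, None) on the empty list: those inputs are outside Pre_; .getD 0 is never read there
  (s, mm.1.getD 0, mm.2.getD 0)

-- ===== PORT B =====
def ordenar_maximo_minimo_alt (una_lista : List Int) : List Int × Int × Int :=
  let s := PySem.List.sorted una_lista (fun x => x) true
  if s = [] then
    -- Source B returns (s, None, None) here; outside Pre_, the value is irrelevant
    (s, 0, 0)
  else
    (s, PySem.List.pyGetD s 0 0, PySem.List.pyGetD s (-1) 0)

-- ===== PRECONDITION & SPEC =====
-- Pre_ excludes the empty list, on which both Pythons return (lista, None, None): None is not an Int.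
def Pre_ordenar_maximo_minimo (una_lista : List Int) : Prop := una_lista ≠ []
instance (una_lista : List Int) : Decidable (Pre_ordenar_maximo_minimo una_lista) := by unfold Pre_ordenar_maximo_minimo; infer_instance
def pvWitness_ordenar_maximo_minimo : List Int := [3, 1, 2, 2]

def Spec_ordenar_maximo_minimo (una_lista : List Int) (out : List Int × Int × Int) : Prop := out = ordenar_maximo_minimo_alt una_lista
instance (una_lista : List Int) (out : List Int × Int × Int) : Decidable (Spec_ordenar_maximo_minimo una_lista out) := by unfold Spec_ordenar_maximo_minimo; infer_instance

-- ===== CLAIM (what is proved, stated in full; the proofs are below) =====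
def Claim_equal_ordenar_maximo_minimo : Prop := ∀ (una_lista : List Int), Dom_ordenar_maximo_minimo una_lista → Pre_ordenar_maximo_minimo una_lista → Spec_ordenar_maximo_minimo una_lista (ordenar_maximo_minimo una_lista)

-- ===== LEMMAS AND PROOFS =====

-- The descending sort is the reverse of the ascending sort (Int values: duplicates are equal).
lemma sorted_rev_eq_reverse_sorted (xs : List Int) :
    PySem.List.sorted xs (fun x => x) true = (PySem.List.sorted xs (fun x => x) false).reverse := by
  have hperm : (PySem.List.sorted xs (fun x => x) true).reverse.Perm xs :=
    ((PySem.List.sorted xs (fun x => x) true).reverse_perm).trans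
      (PySem.List.sorted_perm xs (fun x => x) true)
  have hpair : (PySem.List.sorted xs (fun x => x) true).reverse.Pairwise (fun a b => a ≤ b) := by
    rw [List.pairwise_reverse]
    exact PySem.List.sorted_pairwise_rev xs (fun x => x)
  have h := PySem.List.sorted_id_eq_of_perm_of_pairwise xs
    ((PySem.List.sorted xs (fun x => x) true).reverse) hperm hpair
  have h2 := congrArg List.reverse h
  simpa using h2.symm

-- A's loop after the first step: running max/min over the remaining suffix.
lemma foldA_suffix (xs : List Int) (k : Nat) : ∀ (a : Nat) (m n : Int),
    1 ≤ a → a + k = xs.length →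
    (PySem.List.pyRange (a : Int) (xs.length : Int) 1).foldl (pvStepA xs) (some m, some n)
      = (some ((xs.drop a).foldl max m), some ((xs.drop a).foldl min n)) := by
  induction k with
  | zero =>
    intro a m n _ hlen
    have hnil : xs.drop a = [] := by
      apply List.drop_eq_nil_of_le; omega
    rw [PySem.List.pyRange_one_eq_nil (by omega), hnil]
    simp
  | succ k ih =>
    intro a m n ha hlen
    have halt : a < xs.length := by omega
    rw [PySem.List.pyRange_one_cons (by exact_mod_cast halt)]
    have hdrop : xs.drop a = xs[a] :: xs.drop (a + 1) := List.drop_eq_getElem_cons halt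
    rw [List.foldl_cons, hdrop, List.foldl_cons, List.foldl_cons]
    have hstep : pvStepA xs (some m, some n) (a : Int)
        = (some (max m xs[a]), some (min n xs[a])) := by
      unfold pvStepA
      have hx : PySem.List.pyGetD xs (a : Int) 0 = xs[a] := by
        rw [PySem.List.pyGetD_natCast]
        exact List.getD_eq_getElem xs 0 halt
      have ha0 : ¬ ((a : Int) = 0) := by omega
      simp only [hx, if_neg ha0, Option.getD_some]
      refine Prod.ext ?_ ?_
      · by_cases h : m < xs[a]
        · simp [h, max_eq_right h.le]
        · simp [h, max_eq_left (not_lt.1 h)]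
      · by_cases h : xs[a] < n
        · simp [h, min_eq_right h.le]
        · simp [h, min_eq_left (not_lt.1 h)]
    rw [hstep]
    have hcast : ((a : Int) + 1) = ((a + 1 : Nat) : Int) := by push_cast; ring
    rw [hcast]
    exact ih (a + 1) (max m xs[a]) (min n xs[a]) (by omega) (by omega)

-- A's whole loop on a nonempty list: (some max, some min).
lemma foldA_whole (x : Int) (rest : List Int) :
    (PySem.List.pyRange 0 ((x :: rest).length : Int) 1).foldl (pvStepA (x :: rest)) (none, none)
      = (some (rest.foldl max x), some (rest.foldl min x)) := by
  have hlen : (0 : Int) < ((x :: rest).length : Int) := by simp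
  rw [PySem.List.pyRange_one_cons hlen]
  rw [List.foldl_cons]
  have hstep0 : pvStepA (x :: rest) (none, none) 0 = (some x, some x) := by
    unfold pvStepA; simp [PySem.List.pyGetD_zero_cons]
  rw [hstep0]
  have h01 : (0 : Int) + 1 = ((1 : Nat) : Int) := by norm_num
  rw [h01]
  have h := foldA_suffix (x :: rest) rest.length 1 x x (by omega) (by simp; omega)
  rw [h]
  simp

-- Head of the descending sort is the running max.
lemma head_desc_eq_max (x : Int) (rest : List Int) (hd : Int) (tl : List Int)
    (hcons : PySem.List.sorted (x :: rest) (fun y => y) true = hd :: tl) :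
    hd = rest.foldl max x := by
  have hM := PySem.List.max?_id_cons x rest
  have hMmem := PySem.List.max?_mem hM
  have hMmax := PySem.List.max?_isMax hM
  have hge := PySem.List.key_head_sorted_rev_ge (x :: rest) (fun y => y) hcons
  have hmem : hd ∈ (x :: rest) := by
    refine (PySem.List.mem_sorted (x :: rest) (fun y => y) true hd).1 ?_
    rw [hcons]; simp
  exact le_antisymm (by simpa using hMmax hd hmem) (by simpa using hge _ hMmem)

-- Head of the ascending sort is the running min.
lemma head_asc_eq_min (x : Int) (rest : List Int) (hd : Int) (tl : List Int)
    (hcons : PySem.List.sorted (x :: rest) (fun y => y) false = hd :: tl) :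
    hd = rest.foldl min x := by
  have hM := PySem.List.min?_id_cons x rest
  have hMmem := PySem.List.min?_mem hM
  have hMmin := PySem.List.min?_isMin hM
  have hle := PySem.List.key_head_sorted_le (x :: rest) (fun y => y) hcons
  have hmem : hd ∈ (x :: rest) := by
    refine (PySem.List.mem_sorted (x :: rest) (fun y => y) false hd).1 ?_
    rw [hcons]; simp
  exact le_antisymm (by simpa using hle _ hMmem) (by simpa using hMmin hd hmem)

-- ===== VERDICT (by name: the statement is the Claim_ definition above) =====
theorem ordenar_maximo_minimo_spec : Claim_equal_ordenar_maximo_minimo := by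
  intro una_lista _ hpre
  obtain ⟨x, rest, rfl⟩ := List.exists_cons_of_ne_nil hpre
  unfold Spec_ordenar_maximo_minimo ordenar_maximo_minimo ordenar_maximo_minimo_alt
  have hane : (x :: rest : List Int) ≠ [] := List.cons_ne_nil x rest
  obtain ⟨hd, tl, htd⟩ : ∃ hd tl,
      PySem.List.sorted (x :: rest) (fun y => y) true = hd :: tl := by
    cases h : PySem.List.sorted (x :: rest) (fun y => y) true with
    | nil => exact absurd ((PySem.List.sorted_eq_nil_iff (x :: rest) (fun y => y) true).1 h) hane
    | cons a t => exact ⟨a, t, rfl⟩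
  obtain ⟨h0, t0, ht⟩ : ∃ h0 t0,
      PySem.List.sorted (x :: rest) (fun y => y) false = h0 :: t0 := by
    cases h : PySem.List.sorted (x :: rest) (fun y => y) false with
    | nil => exact absurd ((PySem.List.sorted_eq_nil_iff (x :: rest) (fun y => y) false).1 h) hane
    | cons a t => exact ⟨a, t, rfl⟩
  have hrev := sorted_rev_eq_reverse_sorted (x :: rest)
  simp only [foldA_whole x rest, Option.getD_some]
  rw [if_neg (by rw [htd]; exact List.cons_ne_nil hd tl)]
  refine Prod.ext ?_ (Prod.ext ?_ ?_)
  · exact hrev.symm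
  · rw [htd, PySem.List.pyGetD_zero_cons]
    exact (head_desc_eq_max x rest hd tl htd).symm
  · rw [hrev, ht, PySem.List.pyGetD_neg_one _ 0 (by simp), List.getLast_reverse, List.head_cons]
    exact (head_asc_eq_min x rest h0 t0 ht).symm
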